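/- GENERATED by farm/mkstatement.py from design/units.tsv (unit `square`) and the Specs of Vorbis/Spec/*.lean — do not edit.
   THE STATEMENT of the proof unit `square`: the function `square` (2 instructions) satisfies its contract,
   given the contracts of its callees. What the names mean: Vorbis/Spec/Basic.lean. The theorem to prove:
   `theorem square_ok : Vorbis.Spec.square.Statement`. -/
import Vorbis.Spec.Leaves2
namespace Vorbis.Spec.square
open X86 X86.User Asan

/-- The statement of unit `square`. -/
def Statement : Prop :=
  ∀ (Lay : Layout) (_hLay : Lay.hi = 0x1000000) (μ : Microarch) (_hμ : UserX.MicroOK μ) (u₀ : State)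
    (_hcode : HasCodeNat Lay u₀ Vorbis.L.square.entry Vorbis.Code.code_square.nat Vorbis.L.square.size),
    ∀ (others : List Obj) (frames : List (Nat × FrameLayout)), Calls Lay μ Vorbis.WayInv (Vorbis.conv u₀) Vorbis.L.square.entry (Vorbis.Spec.square.spec others frames)

end Vorbis.Spec.square
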